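-- pv_equiv track=rewrite | github.com/zhendeliu/unsw-2019-t1 | unsw-it-9021/python-code/quiz5/test_quiz5.py | code_derived_set
-- ===== SOURCE A (Python) =====
-- from itertools import accumulate
--
-- def encode_list(encoded_set):
--     i = 0
--     res_lis = []
--     while encoded_set:
--         if encoded_set & 1 and i % 2 == 0:
--             res_lis.append(i // 2)
--         elif encoded_set & 1 and i % 2 == 1:
--             res_lis.append(-i // 2)
--         encoded_set = encoded_set >> 1
--         i += 1
--     res_lis.sort()
--     return res_lis
--
-- def code_derived_set(encoded_set):
--     encoded_running_sum = 0
--     lis = encode_list(encoded_set)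
--     sum_lis = set(accumulate(lis))
--     for i in sum_lis:
--         if i < 0:
--             encoded_running_sum = encoded_running_sum + 2 ** (- i * 2 - 1)
--         else:
--             encoded_running_sum = encoded_running_sum + 2 ** (i * 2)
--     return encoded_running_sum
-- ===== SOURCE B (Python) =====
-- def code_derived_set(encoded_set):
--     # No list, no sort, no set(): scan the bit indices of the input directly
--     # (odd bits from the highest down give the negatives in ascending order,
--     # then even bits from the lowest up give the non-negatives), keep a running
--     # sum, and OR each encoded sum into the result integer -- the result bitset
--     # itself deduplicates, since OR of an already-present power of two is a no-op.
--     result = 0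
--     s = 0
--     L = encoded_set.bit_length()
--     for i in range(L - 1, 0, -1):
--         if i % 2 == 1 and (encoded_set >> i) & 1:
--             s -= (i + 1) // 2
--             result |= 1 << (2 * s if s >= 0 else -2 * s - 1)
--     for i in range(0, L, 2):
--         if (encoded_set >> i) & 1:
--             s += i // 2
--             result |= 1 << (2 * s if s >= 0 else -2 * s - 1)
--     return result
-- ===== Notes on version B (the rewrite author's own statement) =====
-- stated objective: alternative
-- what changed: B drops A's decode-into-a-list / sort / accumulate / set() pipeline entirely: it walks the input's bit indices directly with two range loops (odd bits from the highest index down, then even bits from the lowest up, which visits the decoded values already in sorted order), keeps only a running sum, and ORs each encoded sum's power of two into the result integer, whose own bits perform the deduplication that A delegates to set().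
import Mathlib
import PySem

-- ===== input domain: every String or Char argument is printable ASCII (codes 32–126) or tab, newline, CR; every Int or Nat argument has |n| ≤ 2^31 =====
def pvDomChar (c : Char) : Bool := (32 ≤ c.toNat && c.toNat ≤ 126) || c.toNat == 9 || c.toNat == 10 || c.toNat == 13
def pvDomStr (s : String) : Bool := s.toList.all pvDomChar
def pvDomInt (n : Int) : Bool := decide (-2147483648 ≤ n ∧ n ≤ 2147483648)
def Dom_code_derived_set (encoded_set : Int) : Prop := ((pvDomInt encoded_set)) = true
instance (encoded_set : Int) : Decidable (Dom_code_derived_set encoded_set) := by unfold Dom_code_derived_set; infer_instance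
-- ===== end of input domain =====

-- B replaces A's decode-list/sort/accumulate/set() pipeline by two direct scans over the
-- input's bit indices (odd bits from the top down, even bits from the bottom up), keeping
-- only a running sum and OR-ing each encoded sum into the result integer, whose own bits
-- do the deduplication (objective: alternative algorithm, same asymptotic cost).

-- termination helper cited by the loops: Python's 'n >> 1' strictly shrinks a positive n
theorem pvShr1_toNat_lt (n : Int) (h : 0 < n) : (n >>> (1:Nat)).toNat < n.toNat := by
  have he : n >>> (1:Nat) = n / 2 := by rw [Int.shiftRight_eq_div_pow]; norm_num
  omega

-- ===== PORT A =====
-- the while-loop of encode_list: collect decoded values in bit order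
def pvEncodeLoop (n : Int) (i : Nat) (res : List Int) : List Int :=
  if h : n ≤ 0 then res                           -- 'while encoded_set:' (never exits for n < 0; Pre_ demands 0 ≤ n)
  else if PySem.Int.band n 1 ≠ 0 ∧ i % 2 = 0 then
    pvEncodeLoop (n >>> (1:Nat)) (i + 1) (res ++ [((i / 2 : Nat) : Int)])
  else if PySem.Int.band n 1 ≠ 0 ∧ i % 2 = 1 then
    pvEncodeLoop (n >>> (1:Nat)) (i + 1) (res ++ [PySem.Int.floordiv (-(i : Int)) 2])
  else pvEncodeLoop (n >>> (1:Nat)) (i + 1) res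
termination_by n.toNat
decreasing_by all_goals exact pvShr1_toNat_lt n (by omega)

def pvEncodeList (encoded_set : Int) : List Int :=
  PySem.List.sorted (pvEncodeLoop encoded_set 0 []) (fun x => x) false

-- itertools.accumulate
def pvAccum : List Int → Int → List Int
  | [], _ => []
  | x :: xs, s => (s + x) :: pvAccum xs (s + x)

def code_derived_set (encoded_set : Int) : Int :=
  let lis := pvEncodeList encoded_set
  let sum_lis := PySem.Set.ofList (pvAccum lis 0)
  sum_lis.foldl
    (fun acc i => if i < 0 then acc + 2 ^ (-i * 2 - 1).toNat else acc + 2 ^ (i * 2).toNat) 0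

-- ===== PORT B =====
def code_derived_set_alt (encoded_set : Int) : Int :=
  let L : Int := (PySem.Int.bitLength encoded_set : Int)
  -- first loop: odd-indexed set bits, from the highest index down
  let st1 : Int × Int :=
    (PySem.List.pyRange (L - 1) 0 (-1)).foldl
      (fun st i =>
        if PySem.Int.mod i 2 = 1 ∧ PySem.Int.band (encoded_set >>> i.toNat) 1 ≠ 0 then
          let s := st.1 - PySem.Int.floordiv (i + 1) 2
          (s, PySem.Int.bor st.2
                ((1:Int) <<< (if 0 ≤ s then (2 * s).toNat else (-2 * s - 1).toNat)))
        else st)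
      (0, 0)
  -- second loop: even-indexed set bits, from the lowest index up
  let st2 : Int × Int :=
    (PySem.List.pyRange 0 L 2).foldl
      (fun st i =>
        if PySem.Int.band (encoded_set >>> i.toNat) 1 ≠ 0 then
          let s := st.1 + PySem.Int.floordiv i 2
          (s, PySem.Int.bor st.2
                ((1:Int) <<< (if 0 ≤ s then (2 * s).toNat else (-2 * s - 1).toNat)))
        else st)
      st1
  st2.2

-- ===== PRECONDITION & SPEC =====
-- Pre_ excludes negative inputs: there Python's 'while encoded_set:' never terminates
-- (right-shifting a negative int stays negative), so A returns exactly on the non-negative inputs.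
def Pre_code_derived_set (encoded_set : Int) : Prop := 0 ≤ encoded_set
instance (encoded_set : Int) : Decidable (Pre_code_derived_set encoded_set) := by
  unfold Pre_code_derived_set; infer_instance

def pvWitness_code_derived_set : Int := 2019

def Spec_code_derived_set (encoded_set : Int) (out : Int) : Prop := out = code_derived_set_alt encoded_set
instance (encoded_set : Int) (out : Int) : Decidable (Spec_code_derived_set encoded_set out) := by unfold Spec_code_derived_set; infer_instance

-- ===== CLAIM (what is proved, stated in full; the proofs are below) =====
def Claim_equal_code_derived_set : Prop := ∀ (encoded_set : Int), Dom_code_derived_set encoded_set → Pre_code_derived_set encoded_set → Spec_code_derived_set encoded_set (code_derived_set encoded_set)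

-- ===== LEMMAS AND PROOFS =====

-- proof-side vocabulary ------------------------------------------------------

-- the value decoded from bit index j (even: j//2, odd: -j//2 as A writes it)
def pvDecN (j : Nat) : Int :=
  if j % 2 = 0 then ((j / 2 : Nat) : Int) else PySem.Int.floordiv (-(j : Int)) 2

-- the bit position encoding a prefix-sum value (B's shift amount)
def pvEnc (w : Int) : Nat := if 0 ≤ w then (2 * w).toNat else (-2 * w - 1).toNat

-- ascending list of the set-bit indices of n
def pvBits (n : Int) : List Nat :=
  if h : n ≤ 0 then []
  else (if PySem.Int.band n 1 = 0 then [] else [0]) ++ (pvBits (n >>> (1:Nat))).map (· + 1)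
termination_by n.toNat
decreasing_by exact pvShr1_toNat_lt n (by omega)

-- the uniform step of B's two loops
def pvStep (st : Int × Int) (v : Int) : Int × Int :=
  (st.1 + v, PySem.Int.bor st.2 ((1:Int) <<< pvEnc (st.1 + v)))

-- Nat-level bit facts --------------------------------------------------------

theorem pvLorPow (k : Nat) : ∀ (a : Nat), a ||| 2^k = if a.testBit k then a else a + 2^k := by
  induction k with
  | zero =>
    intro a
    conv_lhs => rw [← Nat.bit_testBit_zero_shiftRight_one a,
      show (2^0 : Nat) = Nat.bit true 0 from rfl, Nat.lor_bit]
    conv_rhs => rw [← Nat.bit_testBit_zero_shiftRight_one a]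
    cases h : a.testBit 0 <;> simp [Nat.bit_val]
  | succ k ih =>
    intro a
    conv_lhs => rw [← Nat.bit_testBit_zero_shiftRight_one a,
      show (2^(k+1) : Nat) = Nat.bit false (2^k) from by simp [Nat.bit_val]; ring, Nat.lor_bit]
    rw [Bool.or_false, ih]
    conv_rhs => rw [← Nat.bit_testBit_zero_shiftRight_one a]
    rw [Nat.testBit_bit_succ]
    cases h : (a >>> 1).testBit k <;> simp [Nat.bit_val] <;> omega


theorem pvSumPowBit : ∀ (K : List Nat), K.Nodup → ∀ k,
    ((K.map (2 ^ ·)).sum).testBit k = decide (k ∈ K) := by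
  intro K
  induction K with
  | nil => intro _ k; simp
  | cons a K ih =>
    intro hnd k
    rw [List.nodup_cons] at hnd
    have hS : ((K.map (2 ^ ·)).sum).testBit a = false := by
      rw [ih hnd.2 a]; simp [hnd.1]
    have hadd : 2^a + (K.map (2 ^ ·)).sum = (K.map (2 ^ ·)).sum ||| 2^a := by
      rw [pvLorPow, hS]; simp; omega
    simp only [List.map_cons, List.sum_cons, hadd, Nat.testBit_or, ih hnd.2,
      Nat.testBit_two_pow]
    by_cases h1 : k = a <;> by_cases h2 : k ∈ K <;> simp [h1, h2, eq_comm] <;> omega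


theorem pvShl1 (k : Nat) : (1:Int) <<< k = ((2^k : Nat) : Int) := by
  simp [Int.shiftLeft_eq]

-- A's loop -------------------------------------------------------------------

theorem pvEncodeLoop_acc : ∀ (k : Nat) (n : Int), n.toNat ≤ k → ∀ (i : Nat) (res : List Int),
    pvEncodeLoop n i res = res ++ pvEncodeLoop n i [] := by
  intro k
  induction k with
  | zero =>
    intro n hk i res
    have hn : n ≤ 0 := by omega
    conv_lhs => rw [pvEncodeLoop.eq_def]
    conv_rhs => rw [pvEncodeLoop.eq_def]
    rw [dif_pos hn, dif_pos hn, List.append_nil]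
  | succ k ih =>
    intro n hk i res
    by_cases hn : n ≤ 0
    · conv_lhs => rw [pvEncodeLoop.eq_def]
      conv_rhs => rw [pvEncodeLoop.eq_def]
      rw [dif_pos hn, dif_pos hn, List.append_nil]
    · have hk' : (n >>> (1:Nat)).toNat ≤ k := by
        have := pvShr1_toNat_lt n (by omega); omega
      conv_lhs => rw [pvEncodeLoop.eq_def]
      conv_rhs => rw [pvEncodeLoop.eq_def]
      rw [dif_neg hn, dif_neg hn]
      split_ifs with h1 h2
      · rw [ih _ hk' (i+1) (res ++ _), ih _ hk' (i+1) ([] ++ _)]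
        simp
      · rw [ih _ hk' (i+1) (res ++ _), ih _ hk' (i+1) ([] ++ _)]
        simp
      · rw [ih _ hk' (i+1) res]


theorem pvEncodeLoop_eq_bits : ∀ (k : Nat) (n : Int), n.toNat ≤ k → ∀ (i : Nat),
    pvEncodeLoop n i [] = (pvBits n).map (fun b => pvDecN (b + i)) := by
  intro k
  induction k with
  | zero =>
    intro n hk i
    have hn : n ≤ 0 := by omega
    rw [pvEncodeLoop.eq_def, dif_pos hn, pvBits.eq_def, dif_pos hn]
    simp
  | succ k ih =>
    intro n hk i
    by_cases hn : n ≤ 0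
    · rw [pvEncodeLoop.eq_def, dif_pos hn, pvBits.eq_def, dif_pos hn]
      simp
    · have hk' : (n >>> (1:Nat)).toNat ≤ k := by
        have := pvShr1_toNat_lt n (by omega); omega
      rw [pvEncodeLoop.eq_def, dif_neg hn, pvBits.eq_def, dif_neg hn]
      have hcomp : ∀ (l : List Nat),
          (l.map (· + 1)).map (fun b => pvDecN (b + i)) = l.map (fun b => pvDecN (b + (i+1))) := by
        intro l
        rw [List.map_map]
        refine List.map_congr_left (fun b _ => ?_)
        show pvDecN (b + 1 + i) = pvDecN (b + (i + 1))
        congr 1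
        omega
      by_cases hb : PySem.Int.band n 1 = 0
      · rw [if_neg (fun h => h.1 hb), if_neg (fun h => h.1 hb), ih _ hk' (i+1)]
        rw [if_pos hb, List.nil_append, List.map_map]
        refine List.map_congr_left (fun b _ => ?_)
        show pvDecN (b + (i + 1)) = pvDecN (b + 1 + i)
        congr 1
        omega
      · by_cases hi : i % 2 = 0
        · rw [if_pos ⟨hb, hi⟩, pvEncodeLoop_acc k _ hk' (i+1), ih _ hk' (i+1), if_neg hb]
          simp only [List.nil_append, List.singleton_append, List.map_cons, hcomp]
          have hhead : ((i / 2 : Nat) : Int) = pvDecN (0 + i) := by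
            simp [pvDecN, hi]
          rw [hhead]
        · have hi1 : i % 2 = 1 := by omega
          rw [if_neg (fun h => hi h.2), if_pos ⟨hb, hi1⟩,
            pvEncodeLoop_acc k _ hk' (i+1), ih _ hk' (i+1), if_neg hb]
          simp only [List.nil_append, List.singleton_append, List.map_cons, hcomp]
          have hhead : PySem.Int.floordiv (-(i : Int)) 2 = pvDecN (0 + i) := by
            simp [pvDecN, hi]
          rw [hhead]


-- pvBits facts ---------------------------------------------------------------

theorem pvMem_pvBits : ∀ (k : Nat) (n : Int), n.toNat ≤ k → 0 ≤ n → ∀ (b : Nat),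
    b ∈ pvBits n ↔ PySem.Int.band (n >>> b) 1 ≠ 0 := by
  intro k
  induction k with
  | zero =>
    intro n hk hn b
    have h0 : n = 0 := by omega
    subst h0
    rw [pvBits.eq_def, dif_pos (by omega)]
    simp only [Int.zero_shiftRight, List.not_mem_nil, false_iff, ne_eq, not_not]
    decide
  | succ k ih =>
    intro n hk hn b
    by_cases hn0 : n ≤ 0
    · have h0 : n = 0 := by omega
      subst h0
      rw [pvBits.eq_def, dif_pos (by omega)]
      simp only [Int.zero_shiftRight, List.not_mem_nil, false_iff, ne_eq, not_not]
      decide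
    · have hk' : (n >>> (1:Nat)).toNat ≤ k := by
        have := pvShr1_toNat_lt n (by omega); omega
      have hsh : 0 ≤ n >>> (1:Nat) := by
        rw [Int.shiftRight_eq_div_pow]
        positivity
      rw [pvBits.eq_def, dif_neg hn0]
      cases b with
      | zero =>
        simp only [List.mem_append, List.mem_map]
        constructor
        · rintro (h | ⟨b', _, hb'⟩)
          · by_cases hb : PySem.Int.band n 1 = 0
            · simp [hb] at h
            · simpa using hb
          · omega
        · intro h
          left
          rw [if_neg (by simpa using h)]
          simp
      | succ b =>
        simp only [List.mem_append, List.mem_map]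
        rw [show n >>> (b+1) = (n >>> (1:Nat)) >>> b from by
          rw [← Int.shiftRight_add, Nat.add_comm]]
        rw [← ih _ hk' hsh b]
        constructor
        · rintro (h | ⟨b', hb', he⟩)
          · split_ifs at h <;> simp at h
          · have : b' = b := by omega
            exact this ▸ hb'
        · intro h
          exact Or.inr ⟨b, h, rfl⟩


theorem pvBits_pairwise : ∀ (k : Nat) (n : Int), n.toNat ≤ k →
    (pvBits n).Pairwise (· < ·) := by
  intro k
  induction k with
  | zero =>
    intro n hk
    rw [pvBits.eq_def, dif_pos (by omega)]
    exact List.Pairwise.nil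
  | succ k ih =>
    intro n hk
    by_cases hn0 : n ≤ 0
    · rw [pvBits.eq_def, dif_pos hn0]
      exact List.Pairwise.nil
    · have hk' : (n >>> (1:Nat)).toNat ≤ k := by
        have := pvShr1_toNat_lt n (by omega); omega
      rw [pvBits.eq_def, dif_neg hn0]
      have htail : ((pvBits (n >>> (1:Nat))).map (· + 1)).Pairwise (· < ·) := by
        rw [List.pairwise_map]
        exact (ih _ hk').imp (by omega)
      split_ifs with hb
      · simpa using htail
      · rw [List.singleton_append, List.pairwise_cons]
        exact ⟨by simp, htail⟩


theorem pvBits_lt_bitLength : ∀ (k : Nat) (n : Int), n.toNat ≤ k → 0 ≤ n →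
    ∀ b ∈ pvBits n, b < PySem.Int.bitLength n := by
  intro k
  induction k with
  | zero =>
    intro n hk hn b hb
    rw [pvBits.eq_def, dif_pos (by omega)] at hb
    simp at hb
  | succ k ih =>
    intro n hk hn b hb
    by_cases hn0 : n ≤ 0
    · rw [pvBits.eq_def, dif_pos hn0] at hb
      simp at hb
    · have hk' : (n >>> (1:Nat)).toNat ≤ k := by
        have := pvShr1_toNat_lt n (by omega); omega
      have hsh : 0 ≤ n >>> (1:Nat) := by
        rw [Int.shiftRight_eq_div_pow]; positivity
      have hfd : n >>> (1:Nat) = PySem.Int.floordiv n 2 := by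
        rw [Int.shiftRight_eq_div_pow, PySem.Int.floordiv_eq_ediv_of_pos (by omega)]
        norm_num
      have hbl : PySem.Int.bitLength n = PySem.Int.bitLength (n >>> (1:Nat)) + 1 := by
        rw [PySem.Int.bitLength_of_pos (by omega), hfd]
      rw [pvBits.eq_def, dif_neg hn0] at hb
      rw [List.mem_append, List.mem_map] at hb
      rcases hb with h | ⟨b', hb', he⟩
      · have : b = 0 := by split_ifs at h <;> simp at h <;> omega
        omega
      · have := ih _ hk' hsh b' hb'
        omega


-- two strictly increasing Int lists with the same members are equal
theorem pvChainEq : ∀ {l₁ l₂ : List Int}, l₁.Pairwise (· < ·) → l₂.Pairwise (· < ·) →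
    (∀ x, x ∈ l₁ ↔ x ∈ l₂) → l₁ = l₂ := by
  intro l₁ l₂ h₁ h₂ hm
  refine List.eq_of_perm_of_sorted (le := (· ≤ ·)) (fun a b _ _ hab hba => le_antisymm hab hba)
    (h₁.imp le_of_lt) (h₂.imp le_of_lt) ?_
  exact (List.perm_ext_iff_of_nodup (h₁.imp ne_of_lt) (h₂.imp ne_of_lt)).mpr hm


-- the filtered index ranges of B are exactly the odd / even set-bit indices ----

theorem pvOddIdx (n : Int) (hn : 0 ≤ n) :
    (PySem.List.pyRange 1 ((PySem.Int.bitLength n : Nat) : Int) 1).filter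
        (fun i => decide (PySem.Int.mod i 2 = 1 ∧ PySem.Int.band (n >>> i.toNat) 1 ≠ 0))
      = ((pvBits n).filter (fun b => decide (b % 2 = 1))).map (Nat.cast : Nat → Int) := by
  refine pvChainEq ((PySem.List.pairwise_lt_pyRange_one _ _).filter _) ?_ ?_
  · rw [List.pairwise_map]
    exact ((pvBits_pairwise n.toNat n le_rfl).filter _).imp (fun h => by exact_mod_cast h)
  · intro x
    rw [List.mem_filter, PySem.List.mem_pyRange_one, List.mem_map]
    constructor
    · rintro ⟨⟨hx1, hxL⟩, hp⟩
      rw [decide_eq_true_iff] at hp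
      refine ⟨x.toNat, ?_, by omega⟩
      rw [List.mem_filter, decide_eq_true_iff]
      refine ⟨(pvMem_pvBits n.toNat n le_rfl hn x.toNat).mpr hp.2, ?_⟩
      have := PySem.Int.mod_eq_emod_of_pos (a := x) (b := 2) (by omega)
      omega
    · rintro ⟨b, hb, rfl⟩
      rw [List.mem_filter, decide_eq_true_iff] at hb
      obtain ⟨hbm, hbo⟩ := hb
      have hband := (pvMem_pvBits n.toNat n le_rfl hn b).mp hbm
      have hlt := pvBits_lt_bitLength n.toNat n le_rfl hn b hbm
      refine ⟨⟨by omega, by exact_mod_cast hlt⟩, ?_⟩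
      rw [decide_eq_true_iff]
      have := PySem.Int.mod_eq_emod_of_pos (a := ((b:Int))) (b := 2) (by omega)
      refine ⟨by omega, ?_⟩
      simpa [Int.shiftRight_natCast_right] using hband


theorem pvEvenIdx (n : Int) (hn : 0 ≤ n) :
    (PySem.List.pyRange 0 ((PySem.Int.bitLength n : Nat) : Int) 2).filter
        (fun i => decide (PySem.Int.band (n >>> i.toNat) 1 ≠ 0))
      = ((pvBits n).filter (fun b => !decide (b % 2 = 1))).map (Nat.cast : Nat → Int) := by
  refine pvChainEq ?_ ?_ ?_
  · refine List.Pairwise.filter _ ?_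
    rw [PySem.List.pyRange_of_pos _ _ (by omega), List.pairwise_map]
    exact (List.pairwise_lt_range).imp (by omega)
  · rw [List.pairwise_map]
    exact ((pvBits_pairwise n.toNat n le_rfl).filter _).imp (fun h => by exact_mod_cast h)
  · intro x
    rw [List.mem_filter, PySem.List.mem_pyRange_iff_of_pos (by omega), List.mem_map]
    constructor
    · rintro ⟨⟨hx0, hxL, hdvd⟩, hp⟩
      rw [decide_eq_true_iff] at hp
      refine ⟨x.toNat, ?_, by omega⟩
      rw [List.mem_filter]
      rw [Int.shiftRight_natCast_right] at hp
      refine ⟨(pvMem_pvBits n.toNat n le_rfl hn x.toNat).mpr hp, ?_⟩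
      simp only [Bool.not_eq_true', decide_eq_false_iff_not]
      omega
    · rintro ⟨b, hb, rfl⟩
      rw [List.mem_filter] at hb
      obtain ⟨hbm, hbe⟩ := hb
      simp only [Bool.not_eq_true', decide_eq_false_iff_not] at hbe
      have hband := (pvMem_pvBits n.toNat n le_rfl hn b).mp hbm
      have hlt := pvBits_lt_bitLength n.toNat n le_rfl hn b hbm
      refine ⟨⟨by omega, by exact_mod_cast hlt, by omega⟩, ?_⟩
      rw [decide_eq_true_iff]
      simpa [Int.shiftRight_natCast_right] using hband


-- pvDecN on odd / even bit indices -------------------------------------------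

theorem pvDecN_odd_lt {a b : Nat} (ha : a % 2 = 1) (hb : b % 2 = 1) (h : b < a) :
    pvDecN a < pvDecN b := by
  unfold pvDecN
  rw [if_neg (by omega), if_neg (by omega),
    PySem.Int.floordiv_eq_ediv_of_pos (by omega), PySem.Int.floordiv_eq_ediv_of_pos (by omega)]
  omega

theorem pvDecN_odd_lt_even {a b : Nat} (ha : a % 2 = 1) (hb : b % 2 = 0) :
    pvDecN a < pvDecN b := by
  unfold pvDecN
  rw [if_neg (by omega), if_pos hb, PySem.Int.floordiv_eq_ediv_of_pos (by omega)]
  omega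

theorem pvDecN_even_mono {a b : Nat} (ha : a % 2 = 0) (hb : b % 2 = 0) (h : a < b) :
    pvDecN a < pvDecN b := by
  unfold pvDecN
  rw [if_pos ha, if_pos hb]
  omega

-- A's sorted decoded list is B's implicit value sequence -----------------------

theorem pvSorted_eq (n : Int) :
    pvEncodeList n
      = (((pvBits n).filter (fun b => decide (b % 2 = 1))).reverse.map pvDecN)
        ++ ((pvBits n).filter (fun b => !decide (b % 2 = 1))).map pvDecN := by
  unfold pvEncodeList
  refine PySem.List.sorted_eq_of_perm_of_pairwise_lt _ _ (fun x => x) ?_ ?_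
  · have h1 : ((pvBits n).filter (fun b => decide (b % 2 = 1))).reverse.map pvDecN
        ++ ((pvBits n).filter (fun b => !decide (b % 2 = 1))).map pvDecN
        = ((((pvBits n).filter (fun b => decide (b % 2 = 1))).reverse
            ++ (pvBits n).filter (fun b => !decide (b % 2 = 1))).map pvDecN) := by
      rw [List.map_append]
    rw [h1, pvEncodeLoop_eq_bits n.toNat n le_rfl 0]
    have h2 : (pvBits n).map (fun b => pvDecN (b + 0)) = (pvBits n).map pvDecN := by
      exact List.map_congr_left (fun b _ => by rw [Nat.add_zero])
    rw [h2]
    refine List.Perm.map pvDecN ?_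
    refine List.Perm.trans (List.Perm.append_right _ (List.reverse_perm _)) ?_
    exact List.filter_append_perm _ _
  · rw [List.pairwise_append]
    have hodd := (pvBits_pairwise n.toNat n le_rfl).filter (fun b => decide (b % 2 = 1))
    have heven := (pvBits_pairwise n.toNat n le_rfl).filter (fun b => !decide (b % 2 = 1))
    refine ⟨?_, ?_, ?_⟩
    · rw [List.pairwise_map, List.pairwise_reverse]
      refine hodd.imp_of_mem ?_
      intro a b ha hb hab
      rw [List.mem_filter, decide_eq_true_iff] at ha hb
      exact pvDecN_odd_lt hb.2 ha.2 hab
    · rw [List.pairwise_map]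
      refine heven.imp_of_mem ?_
      intro a b ha hb hab
      rw [List.mem_filter, Bool.not_eq_true', decide_eq_false_iff_not] at ha hb
      exact pvDecN_even_mono (by omega) (by omega) hab
    · intro x hx y hy
      rw [List.mem_map] at hx hy
      obtain ⟨a, ha, rfl⟩ := hx
      obtain ⟨b, hb, rfl⟩ := hy
      rw [List.mem_reverse, List.mem_filter, decide_eq_true_iff] at ha
      rw [List.mem_filter, Bool.not_eq_true', decide_eq_false_iff_not] at hb
      exact pvDecN_odd_lt_even ha.2 (by omega)


-- B's fold, rephrased ----------------------------------------------------------

theorem pvAlt_eq_foldl (n : Int) (hn : 0 ≤ n) :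
    code_derived_set_alt n
      = (((((pvBits n).filter (fun b => decide (b % 2 = 1))).reverse.map pvDecN)
          ++ ((pvBits n).filter (fun b => !decide (b % 2 = 1))).map pvDecN).foldl
            pvStep (0, 0)).2 := by
  have hL : ((PySem.Int.bitLength n : Nat) : Int) - 1 + 1 = ((PySem.Int.bitLength n : Nat) : Int) := by
    ring
  have hOdd : ∀ init : Int × Int,
      (PySem.List.pyRange (((PySem.Int.bitLength n : Nat) : Int) - 1) 0 (-1)).foldl
        (fun st i =>
          if PySem.Int.mod i 2 = 1 ∧ PySem.Int.band (n >>> i.toNat) 1 ≠ 0 then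
            let s := st.1 - PySem.Int.floordiv (i + 1) 2
            (s, PySem.Int.bor st.2
                  ((1:Int) <<< (if 0 ≤ s then (2 * s).toNat else (-2 * s - 1).toNat)))
          else st) init
      = ((((pvBits n).filter (fun b => decide (b % 2 = 1))).reverse.map pvDecN).foldl
          pvStep init) := by
    intro init
    rw [PySem.List.foldl_ite_eq_foldl_filter, PySem.List.pyRange_neg_one_eq_reverse,
      List.filter_reverse]
    rw [show (0:Int) + 1 = 1 from rfl, hL, pvOddIdx n hn, ← List.map_reverse,
      List.foldl_map, List.foldl_map]
    refine PySem.List.foldl_congr_mem' _ _ _ init ?_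
    intro b hb st
    rw [List.mem_reverse, List.mem_filter, decide_eq_true_iff] at hb
    have hv : st.1 - PySem.Int.floordiv ((b : Int) + 1) 2 = st.1 + pvDecN b := by
      unfold pvDecN
      rw [if_neg (by omega), PySem.Int.floordiv_eq_ediv_of_pos (by omega),
        PySem.Int.floordiv_eq_ediv_of_pos (by omega)]
      omega
    simp only [pvStep, pvEnc, hv]
  have hEven : ∀ init : Int × Int,
      (PySem.List.pyRange 0 ((PySem.Int.bitLength n : Nat) : Int) 2).foldl
        (fun st i =>
          if PySem.Int.band (n >>> i.toNat) 1 ≠ 0 then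
            let s := st.1 + PySem.Int.floordiv i 2
            (s, PySem.Int.bor st.2
                  ((1:Int) <<< (if 0 ≤ s then (2 * s).toNat else (-2 * s - 1).toNat)))
          else st) init
      = ((((pvBits n).filter (fun b => !decide (b % 2 = 1))).map pvDecN).foldl
          pvStep init) := by
    intro init
    rw [PySem.List.foldl_ite_eq_foldl_filter, pvEvenIdx n hn, List.foldl_map, List.foldl_map]
    refine PySem.List.foldl_congr_mem' _ _ _ init ?_
    intro b hb st
    rw [List.mem_filter, Bool.not_eq_true', decide_eq_false_iff_not] at hb
    have hv : st.1 + PySem.Int.floordiv ((b : Int)) 2 = st.1 + pvDecN b := by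
      unfold pvDecN
      rw [if_pos (by omega), PySem.Int.floordiv_eq_ediv_of_pos (by omega)]
      omega
    simp only [pvStep, pvEnc, hv]
  simp only [code_derived_set_alt]
  rw [List.foldl_append, hOdd, hEven]


theorem pvStep_fold : ∀ (vs : List Int) (s r : Int),
    ((vs.foldl pvStep (s, r)).2)
      = (pvAccum vs s).foldl (fun r w => PySem.Int.bor r ((1:Int) <<< pvEnc w)) r := by
  intro vs
  induction vs with
  | nil => intro s r; simp [pvAccum]
  | cons v vs ih =>
    intro s r
    simp only [List.foldl_cons, pvAccum]
    exact ih (s + v) _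


theorem pvOrFold : ∀ (ws : List Int) (K : PySem.Set Int), K.Nodup →
    ws.foldl (fun r w => PySem.Int.bor r ((1:Int) <<< pvEnc w))
        ((K.map (fun w => ((2 ^ pvEnc w : Nat) : Int))).sum)
      = ((PySem.Set.update K ws).map (fun w => ((2 ^ pvEnc w : Nat) : Int))).sum := by
  intro ws
  induction ws with
  | nil => intro K _; simp [PySem.Set.update]
  | cons w ws ih =>
    intro K hnd
    have hcast : (K.map (fun w => ((2 ^ pvEnc w : Nat) : Int))).sum
        = ((((K.map pvEnc).map (2 ^ ·)).sum : Nat) : Int) := by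
      rw [Nat.cast_list_sum, List.map_map, List.map_map]
      rfl
    have hinj : Function.Injective pvEnc := by
      intro a b hab
      unfold pvEnc at hab
      split_ifs at hab <;> omega
    have hndN : ((K.map pvEnc)).Nodup := hnd.map hinj
    have hupd : PySem.Set.update K (w :: ws) = PySem.Set.update (PySem.Set.add K w) ws := rfl
    rw [List.foldl_cons, hupd]
    have hacc : PySem.Int.bor ((K.map (fun w => ((2 ^ pvEnc w : Nat) : Int))).sum)
          ((1:Int) <<< pvEnc w)
        = ((PySem.Set.add K w).map (fun w => ((2 ^ pvEnc w : Nat) : Int))).sum := by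
      rw [hcast, pvShl1, PySem.Int.bor_natCast, pvLorPow, pvSumPowBit _ hndN]
      by_cases hw : w ∈ K
      · have hmem : pvEnc w ∈ K.map pvEnc := List.mem_map_of_mem hw
        rw [if_pos (by simpa using hmem)]
        rw [show PySem.Set.add K w = K from by simp [PySem.Set.add, PySem.Set.contains, hw]]
        rw [hcast]
      · have hmem : pvEnc w ∉ K.map pvEnc := fun h => hw ((List.mem_map_of_injective hinj).mp h)
        rw [if_neg (by simpa using hmem)]
        rw [show PySem.Set.add K w = K ++ [w] from by
          simp [PySem.Set.add, PySem.Set.contains, hw]]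
        rw [List.map_append, List.sum_append, hcast]
        push_cast
        simp
    rw [hacc]
    refine ih (PySem.Set.add K w) ?_
    by_cases hw : w ∈ K
    · rw [show PySem.Set.add K w = K from by simp [PySem.Set.add, PySem.Set.contains, hw]]
      exact hnd
    · rw [show PySem.Set.add K w = K ++ [w] from by
        simp [PySem.Set.add, PySem.Set.contains, hw]]
      simp only [List.nodup_append, List.nodup_cons, List.not_mem_nil, not_false_iff,
        List.nodup_nil, and_true, true_and]
      refine ⟨hnd, ?_⟩
      intro a ha
      show ∀ b ∈ [w], a ≠ b
      intro b hb
      rw [List.mem_singleton] at hb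
      exact fun h => hw ((hb ▸ h) ▸ ha)


-- ===== VERDICT (by name: the statement is the Claim_ definition above) =====
theorem code_derived_set_spec : Claim_equal_code_derived_set := by
  intro n _hdom hpre
  unfold Spec_code_derived_set
  rw [pvAlt_eq_foldl n hpre, ← pvSorted_eq n]
  rw [pvStep_fold]
  simp only [code_derived_set]
  have hbody : (fun (acc i : Int) =>
        if i < 0 then acc + 2 ^ (-i * 2 - 1).toNat else acc + 2 ^ (i * 2).toNat)
      = fun (acc i : Int) => acc + ((2 ^ pvEnc i : Nat) : Int) := by
    funext acc i
    unfold pvEnc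
    by_cases h : i < 0
    · rw [if_pos h, if_neg (by omega), show (-i * 2 - 1).toNat = (-2 * i - 1).toNat from by omega]
      push_cast
      ring
    · rw [if_neg h, if_pos (by omega), show (i * 2).toNat = (2 * i).toNat from by omega]
      push_cast
      ring
  rw [hbody, PySem.List.foldl_add]
  rw [show (0:Int) = (([] : List Int).map (fun w => ((2 ^ pvEnc w : Nat) : Int))).sum from rfl,
    pvOrFold _ [] List.nodup_nil]
  simp [PySem.Set.update, PySem.Set.ofList]
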